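-- pv_equiv track=rewrite | github.com/Google-DSC-SCH/2022-GDSCSCH-AlgorithmStudy | 00_조준장/디펜스 게임.py | solution
-- ===== SOURCE A (Python) =====
-- import heapq
--
-- def solution(n, k, enemy):
--     answer = 0
--     heap = []
--     for e in enemy:
--         heapq.heappush(heap, -e)
--         n -= e
--         if n < 0:
--             if k == 0:
--                 break
--             n -= heapq.heappop(heap)
--             k -= 1
--
--         answer += 1
--     return answer
-- ===== SOURCE B (Python) =====
-- def solution(n, k, enemy):
--     # Same-value re-implementation: no heap, no sign-flip trick; keep the absorbed
--     # waves in a plain list and rescan it for the largest one when hp runs out.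
--     hp, uses, absorbed = n, k, []
--     for i, e in enumerate(enemy):
--         absorbed.append(e)
--         hp -= e
--         if hp < 0:
--             if uses == 0:
--                 return i
--             big = max(absorbed)
--             absorbed.remove(big)
--             hp += big
--             uses -= 1
--     return len(enemy)
-- ===== Notes on version B (the rewrite author's own statement) =====
-- stated objective: simpler
-- what changed: Drops heapq and the negate-to-get-a-max-heap trick: B keeps the absorbed waves in a plain unsorted list and, only when hp goes negative, rescans it with max()/remove() to undo the largest wave; the loop is an enumerate with early return instead of a counter with break.
import Mathlib
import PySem

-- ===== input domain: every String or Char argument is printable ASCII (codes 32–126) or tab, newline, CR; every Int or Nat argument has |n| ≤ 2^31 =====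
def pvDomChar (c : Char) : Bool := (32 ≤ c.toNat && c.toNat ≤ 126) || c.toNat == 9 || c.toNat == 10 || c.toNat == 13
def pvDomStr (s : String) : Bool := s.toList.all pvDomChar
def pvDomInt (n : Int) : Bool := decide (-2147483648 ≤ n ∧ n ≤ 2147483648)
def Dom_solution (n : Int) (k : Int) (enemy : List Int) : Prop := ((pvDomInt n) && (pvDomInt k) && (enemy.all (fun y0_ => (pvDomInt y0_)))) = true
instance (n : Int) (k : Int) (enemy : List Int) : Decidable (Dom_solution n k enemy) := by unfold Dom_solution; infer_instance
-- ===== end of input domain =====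

-- B re-implements A's potion greedy without heapq: a plain unsorted list of absorbed
-- waves, rescanned with max()/remove() when hp runs out (simpler; no speed claim).


-- ===== PORT A =====
-- A uses heapq only as a min-priority queue of Ints through heappush/heappop; it is
-- modeled exactly by an ascending-sorted list (heappush = ordered insert, heappop =
-- take the head): the sequence of popped values A observes is identical.
def heapPush (x : Int) : List Int → List Int
  | [] => [x]
  | y :: t => if x ≤ y then x :: y :: t else y :: heapPush x t

def solutionLoop (heap : List Int) (n : Int) (k : Int) (answer : Int) : List Int → Int
  | [] => answer
  | e :: rest =>
    let heap' := heapPush (-e) heap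
    let n' := n - e
    if n' < 0 then
      if k = 0 then answer
      else
        match heap' with
        | [] => answer          -- unreachable: heap' is nonempty right after a push
        | h :: t => solutionLoop t (n' - h) (k - 1) (answer + 1) rest
    else solutionLoop heap' n' k (answer + 1) rest

def solution (n : Int) (k : Int) (enemy : List Int) : Int :=
  solutionLoop [] n k 0 enemy

-- ===== PORT B =====
def solutionAltGo (hp : Int) (uses : Int) (absorbed : List Int) (i : Int) : List Int → Int
  | [] => i
  | e :: rest =>
    let absorbed' := absorbed ++ [e]
    let hp' := hp - e
    if hp' < 0 then
      if uses = 0 then i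
      else
        match PySem.List.max? absorbed' (fun x => x) with
        | none => i             -- unreachable: absorbed' is nonempty
        | some big =>
          match PySem.List.remove? absorbed' big with
          | none => i           -- unreachable: big ∈ absorbed'
          | some kept => solutionAltGo (hp' + big) (uses - 1) kept (i + 1) rest
    else solutionAltGo hp' uses absorbed' (i + 1) rest

def solution_alt (n : Int) (k : Int) (enemy : List Int) : Int :=
  solutionAltGo n k [] 0 enemy

-- ===== PRECONDITION & SPEC =====
def Spec_solution (n : Int) (k : Int) (enemy : List Int) (out : Int) : Prop := out = solution_alt n k enemy
instance (n : Int) (k : Int) (enemy : List Int) (out : Int) : Decidable (Spec_solution n k enemy out) := by unfold Spec_solution; infer_instance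

-- ===== CLAIM (what is proved, stated in full; the proofs are below) =====
def Claim_equal_solution : Prop := ∀ (n : Int) (k : Int) (enemy : List Int), Dom_solution n k enemy → Spec_solution n k enemy (solution n k enemy)

-- ===== LEMMAS AND PROOFS =====

theorem heapPush_ne_nil (x : Int) (l : List Int) : heapPush x l ≠ [] := by
  cases l with
  | nil => simp [heapPush]
  | cons y t => simp only [heapPush]; split <;> simp

theorem heapPush_perm (x : Int) (l : List Int) : (heapPush x l).Perm (x :: l) := by
  induction l with
  | nil => simp [heapPush]
  | cons y t ih =>
    simp only [heapPush]
    split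
    · exact List.Perm.refl _
    · exact (List.Perm.cons y ih).trans (List.Perm.swap x y t)

theorem heapPush_sorted (x : Int) (l : List Int) (h : List.Pairwise (· ≤ ·) l) :
    List.Pairwise (· ≤ ·) (heapPush x l) := by
  induction l with
  | nil => simp [heapPush]
  | cons y t ih =>
    simp only [heapPush]
    have hyt := List.pairwise_cons.mp h
    split
    · rename_i hxy
      refine List.pairwise_cons.mpr ⟨?_, h⟩
      intro b hb
      rcases List.mem_cons.mp hb with hb | hb
      · omega
      · exact le_trans hxy (hyt.1 b hb)
    · rename_i hxy
      refine List.pairwise_cons.mpr ⟨?_, ih hyt.2⟩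
      intro b hb
      rcases List.mem_cons.mp ((heapPush_perm x t).mem_iff.mp hb) with hb | hb
      · omega
      · exact hyt.1 b hb

-- main loop invariant: the heap (negated) is a permutation of B's absorbed list
theorem loop_eq : ∀ (rest heap absorbed : List Int) (n k i : Int),
    List.Pairwise (· ≤ ·) heap → (heap.map (fun x => -x)).Perm absorbed →
    solutionLoop heap n k i rest = solutionAltGo n k absorbed i rest := by
  intro rest
  induction rest with
  | nil => intro heap absorbed n k i _ _; rfl
  | cons e rest ih =>
    intro heap absorbed n k i hs hp
    simp only [solutionLoop, solutionAltGo]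
    have hs' : List.Pairwise (· ≤ ·) (heapPush (-e) heap) := heapPush_sorted _ _ hs
    have hperm' : ((heapPush (-e) heap).map (fun x => -x)).Perm (absorbed ++ [e]) := by
      have h1 : ((heapPush (-e) heap).map (fun x => -x)).Perm ((-e :: heap).map (fun x => -x)) :=
        (heapPush_perm (-e) heap).map _
      have h2 : ((-e :: heap).map (fun x => -x)) = e :: heap.map (fun x => -x) := by simp
      have h3 : (e :: heap.map (fun x => -x)).Perm (e :: absorbed) := hp.cons e
      have h4 : (e :: absorbed).Perm (absorbed ++ [e]) :=
        (List.perm_append_singleton e absorbed).symm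
      exact (h1.trans (h2 ▸ h3)).trans h4
    by_cases hn : n - e < 0
    · simp only [if_pos hn]
      by_cases hk : k = 0
      · simp [hk]
      · simp only [if_neg hk]
        rcases hh : heapPush (-e) heap with _ | ⟨h, t⟩
        · exact absurd hh (heapPush_ne_nil _ _)
        · -- h is the minimum of the heap, so -h is the maximum of absorbed ++ [e]
          have hsorted : List.Pairwise (· ≤ ·) (h :: t) := hh ▸ hs'
          have hpermc : ((h :: t).map (fun x => -x)).Perm (absorbed ++ [e]) := hh ▸ hperm'
          have hmemh : -h ∈ absorbed ++ [e] := hpermc.mem_iff.mp (by simp)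
          have hmax : ∀ y ∈ absorbed ++ [e], y ≤ -h := by
            intro y hy
            have : y ∈ (h :: t).map (fun x => -x) := hpermc.mem_iff.mpr hy
            rcases List.mem_map.mp this with ⟨z, hz, rfl⟩
            rcases List.mem_cons.mp hz with hz | hz
            · omega
            · have := (List.pairwise_cons.mp hsorted).1 z hz; omega
          rcases hm : PySem.List.max? (absorbed ++ [e]) (fun x => x) with _ | ⟨m⟩
          · exact absurd ((PySem.List.max?_eq_none_iff _ _).mp hm) (by simp)
          · have hmmem : m ∈ absorbed ++ [e] := PySem.List.max?_mem hm
            have hmeq : m = -h := by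
              have h1 : m ≤ -h := hmax m hmmem
              have h2 : -h ≤ m := PySem.List.max?_isMax hm (-h) hmemh
              omega
            subst hmeq
            have hrm : PySem.List.remove? (absorbed ++ [e]) (-h) = some ((absorbed ++ [e]).erase (-h)) :=
              PySem.List.remove?_eq_some_erase _ _ hmmem
            simp only [hrm]
            have htperm : (t.map (fun x => -x)).Perm ((absorbed ++ [e]).erase (-h)) := by
              have h5 := hpermc.erase (-h)
              rw [List.map_cons, List.erase_cons_head] at h5
              exact h5
            have harith : n - e - h = n - e + -h := by omega
            rw [harith]
            exact ih t ((absorbed ++ [e]).erase (-h)) _ _ _ hsorted.tail htperm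
    · simp only [if_neg hn]
      exact ih _ _ _ _ _ hs' hperm'

-- ===== VERDICT (by name: the statement is the Claim_ definition above) =====
theorem solution_spec : Claim_equal_solution := by
  intro n k enemy _
  unfold Spec_solution solution solution_alt
  exact loop_eq enemy [] [] n k 0 (by simp) (by simp)
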